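-- pv_equiv track=rewrite | github.com/nklugman/utility_app | Parsing python script/Scheduled_outages_main.py | getlatestpdf
-- ===== SOURCE A (Python) =====
-- def getlatestpdf(pdf_files):
--     curr = "00.00.0000.pdf"
--     for pdf_file in pdf_files:
--         temp = str(pdf_file)
--         temp2 = str(curr)
--         if (temp[9] > temp2[9]):
--             curr = pdf_file
--         elif (temp[9] == temp2[9]) and (temp[3:5] > temp2[3:5]):
--             curr = pdf_file
--         elif (temp[9] == temp2[9]) and (temp[3:5] == temp2[3:5]) and (temp[0:2] > temp2[0:2]):
--             curr = pdf_file
--     #print (curr)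
--     return str(curr)
-- ===== SOURCE B (Python) =====
-- def getlatestpdf(pdf_files):
--     def key(f):
--         f = str(f)
--         return f[9] + f[3:5] + f[0:2]
--     candidates = ["00.00.0000.pdf"] + [str(f) for f in pdf_files]
--     return sorted(candidates, key=key, reverse=True)[0]
-- ===== Notes on version B (the rewrite author's own statement) =====
-- stated objective: idiomatic
-- what changed: Replaces A's hand-written three-branch running-max scan with a key function plus a stable reverse sort of the seed-prepended candidate list, returning its first element.
import Mathlib
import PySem

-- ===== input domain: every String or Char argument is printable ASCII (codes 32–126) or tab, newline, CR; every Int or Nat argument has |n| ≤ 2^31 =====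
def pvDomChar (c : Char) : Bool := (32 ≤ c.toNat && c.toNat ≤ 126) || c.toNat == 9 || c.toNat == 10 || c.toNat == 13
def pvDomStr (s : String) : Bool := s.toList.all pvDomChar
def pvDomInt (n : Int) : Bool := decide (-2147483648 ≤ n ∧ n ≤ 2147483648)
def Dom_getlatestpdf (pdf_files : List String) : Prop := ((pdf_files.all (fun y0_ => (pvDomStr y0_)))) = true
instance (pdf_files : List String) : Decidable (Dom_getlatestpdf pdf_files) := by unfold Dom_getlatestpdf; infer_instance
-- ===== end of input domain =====

-- B replaces A's hand-written three-branch max-scan by a key function and a stable reverse sort, taking the first element (idiomatic; not claimed faster).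

-- ===== PORT A =====
-- temp[9] is ported as (pyGet? temp 9).getD ' ' : Pre_ keeps exactly the inputs where
-- Python's temp[9] succeeds (all names of length ≥ 10), so the default is never taken there.
-- String slices and comparisons are on List Char (String.toList), lexicographic as in Python.
def getlatestpdf (pdf_files : List String) : String :=
  pdf_files.foldl (fun curr pdf_file =>
    if (PySem.List.pyGet? pdf_file.toList 9).getD ' ' > (PySem.List.pyGet? curr.toList 9).getD ' ' then
      pdf_file
    else if (PySem.List.pyGet? pdf_file.toList 9).getD ' ' = (PySem.List.pyGet? curr.toList 9).getD ' ' ∧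
            PySem.List.slice pdf_file.toList (some 3) (some 5) > PySem.List.slice curr.toList (some 3) (some 5) then
      pdf_file
    else if (PySem.List.pyGet? pdf_file.toList 9).getD ' ' = (PySem.List.pyGet? curr.toList 9).getD ' ' ∧
            PySem.List.slice pdf_file.toList (some 3) (some 5) = PySem.List.slice curr.toList (some 3) (some 5) ∧
            PySem.List.slice pdf_file.toList (some 0) (some 2) > PySem.List.slice curr.toList (some 0) (some 2) then
      pdf_file
    else curr) "00.00.0000.pdf"

-- ===== PORT B =====
-- key(f) = f[9] + f[3:5] + f[0:2] as a character list (string concatenation in Python)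
def pvKey (f : String) : List Char :=
  (PySem.List.pyGet? f.toList 9).getD ' ' ::
    (PySem.List.slice f.toList (some 3) (some 5) ++ PySem.List.slice f.toList (some 0) (some 2))

-- sorted(candidates, key=key, reverse=True)[0]; the list is nonempty, so [0] is headD
def getlatestpdf_alt (pdf_files : List String) : String :=
  (PySem.List.sorted ("00.00.0000.pdf" :: pdf_files) pvKey true).headD "00.00.0000.pdf"

-- ===== PRECONDITION & SPEC =====
-- Python A raises IndexError (temp[9]) exactly when some file name has fewer than 10 characters.
def Pre_getlatestpdf (pdf_files : List String) : Prop :=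
  ∀ s ∈ pdf_files, 10 ≤ s.toList.length
instance (pdf_files : List String) : Decidable (Pre_getlatestpdf pdf_files) := by
  unfold Pre_getlatestpdf; infer_instance
def pvWitness_getlatestpdf : List String := ["01.02.2021.pdf", "03.04.2022.pdf"]
def Spec_getlatestpdf (pdf_files : List String) (out : String) : Prop := out = getlatestpdf_alt pdf_files
instance (pdf_files : List String) (out : String) : Decidable (Spec_getlatestpdf pdf_files out) := by unfold Spec_getlatestpdf; infer_instance

-- ===== CLAIM (what is proved, stated in full; the proofs are below) =====
def Claim_equal_getlatestpdf : Prop := ∀ (pdf_files : List String), Dom_getlatestpdf pdf_files → Pre_getlatestpdf pdf_files → Spec_getlatestpdf pdf_files (getlatestpdf pdf_files)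

-- ===== LEMMAS AND PROOFS =====

-- length of the slices used by the key: 2 characters each, once the name has ≥ 5 characters
theorem pvSliceLen35 (xs : List Char) (h : 5 ≤ xs.length) :
    (PySem.List.slice xs (some 3) (some 5)).length = 2 := by
  have h2 := PySem.List.slice_natCast xs 3 5
  have e3 : ((3 : Nat) : Int) = (3 : Int) := by norm_num
  have e5 : ((5 : Nat) : Int) = (5 : Int) := by norm_num
  rw [e3, e5] at h2
  rw [h2]; simp; omega

-- lexicographic order on a concatenation whose first blocks have equal (fixed) length
theorem pvAppend_lt (a b u v : List Char) (ha : a.length = 2) (hb : b.length = 2) :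
    (a ++ u) < (b ++ v) ↔ a < b ∨ (a = b ∧ u < v) := by
  obtain ⟨a1, a2, rfl⟩ := List.length_eq_two.mp ha
  obtain ⟨b1, b2, rfl⟩ := List.length_eq_two.mp hb
  simp [List.cons_lt_cons_iff]
  tauto

-- the key comparison is exactly A's three-branch condition
theorem pvKey_lt_iff (c f : String) (hc : 5 ≤ c.toList.length) (hf : 5 ≤ f.toList.length) :
    pvKey c < pvKey f ↔
      ((PySem.List.pyGet? f.toList 9).getD ' ' > (PySem.List.pyGet? c.toList 9).getD ' ' ∨
       ((PySem.List.pyGet? f.toList 9).getD ' ' = (PySem.List.pyGet? c.toList 9).getD ' ' ∧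
        PySem.List.slice f.toList (some 3) (some 5) > PySem.List.slice c.toList (some 3) (some 5)) ∨
       ((PySem.List.pyGet? f.toList 9).getD ' ' = (PySem.List.pyGet? c.toList 9).getD ' ' ∧
        PySem.List.slice f.toList (some 3) (some 5) = PySem.List.slice c.toList (some 3) (some 5) ∧
        PySem.List.slice f.toList (some 0) (some 2) > PySem.List.slice c.toList (some 0) (some 2))) := by
  unfold pvKey
  rw [List.cons_lt_cons_iff,
    pvAppend_lt _ _ _ _ (pvSliceLen35 c.toList hc) (pvSliceLen35 f.toList hf)]
  constructor
  · rintro (h | ⟨h9, (h | ⟨h35, h02⟩)⟩)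
    · exact Or.inl h
    · exact Or.inr (Or.inl ⟨h9.symm, h⟩)
    · exact Or.inr (Or.inr ⟨h9.symm, h35.symm, h02⟩)
  · rintro (h | ⟨h9, h⟩ | ⟨h9, h35, h02⟩)
    · exact Or.inl h
    · exact Or.inr ⟨h9.symm, Or.inl h⟩
    · exact Or.inr ⟨h9.symm, Or.inr ⟨h35.symm, h02⟩⟩

-- one step of A's scan equals the "keep the first key-maximum" step
theorem pvStep_eq (c f : String) (hc : 5 ≤ c.toList.length) (hf : 5 ≤ f.toList.length) :
    (if (PySem.List.pyGet? f.toList 9).getD ' ' > (PySem.List.pyGet? c.toList 9).getD ' ' then f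
     else if (PySem.List.pyGet? f.toList 9).getD ' ' = (PySem.List.pyGet? c.toList 9).getD ' ' ∧
             PySem.List.slice f.toList (some 3) (some 5) > PySem.List.slice c.toList (some 3) (some 5) then f
     else if (PySem.List.pyGet? f.toList 9).getD ' ' = (PySem.List.pyGet? c.toList 9).getD ' ' ∧
             PySem.List.slice f.toList (some 3) (some 5) = PySem.List.slice c.toList (some 3) (some 5) ∧
             PySem.List.slice f.toList (some 0) (some 2) > PySem.List.slice c.toList (some 0) (some 2) then f
     else c)
    = if pvKey c < pvKey f then f else c := by
  have hiff := pvKey_lt_iff c f hc hf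
  by_cases h1 : (PySem.List.pyGet? f.toList 9).getD ' ' > (PySem.List.pyGet? c.toList 9).getD ' '
  · rw [if_pos h1, if_pos (hiff.mpr (Or.inl h1))]
  · rw [if_neg h1]
    by_cases h2 : (PySem.List.pyGet? f.toList 9).getD ' ' = (PySem.List.pyGet? c.toList 9).getD ' ' ∧
        PySem.List.slice f.toList (some 3) (some 5) > PySem.List.slice c.toList (some 3) (some 5)
    · rw [if_pos h2, if_pos (hiff.mpr (Or.inr (Or.inl h2)))]
    · rw [if_neg h2]
      by_cases h3 : (PySem.List.pyGet? f.toList 9).getD ' ' = (PySem.List.pyGet? c.toList 9).getD ' ' ∧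
          PySem.List.slice f.toList (some 3) (some 5) = PySem.List.slice c.toList (some 3) (some 5) ∧
          PySem.List.slice f.toList (some 0) (some 2) > PySem.List.slice c.toList (some 0) (some 2)
      · rw [if_pos h3, if_pos (hiff.mpr (Or.inr (Or.inr h3)))]
      · rw [if_neg h3, if_neg (fun hk => (by tauto : False))]

-- head of the insertion-sort fold is the strict running maximum (first maximum wins)
theorem pvHead_foldl_insertBy (fs : List String) (c d : String) (t : List String) :
    ((fs.foldl (fun acc x => PySem.List.insertBy (fun a b => decide (pvKey b < pvKey a)) x acc) (c :: t)).headD d)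
      = fs.foldl (fun cu x => if pvKey cu < pvKey x then x else cu) c := by
  induction fs generalizing c t with
  | nil => simp
  | cons x fs ih =>
    simp only [List.foldl_cons]
    have hins : PySem.List.insertBy (fun a b => decide (pvKey b < pvKey a)) x (c :: t)
        = if pvKey c < pvKey x then x :: c :: t else c :: PySem.List.insertBy (fun a b => decide (pvKey b < pvKey a)) x t := by
      simp [PySem.List.insertBy]
    rw [hins]
    by_cases h : pvKey c < pvKey x
    · simp only [if_pos h]
      exact ih x (c :: t)
    · simp only [if_neg h]
      exact ih c (PySem.List.insertBy (fun a b => decide (pvKey b < pvKey a)) x t)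

-- A's whole scan equals the key-maximum fold, as long as every name has ≥ 10 characters
theorem pvScan_eq (fs : List String) (c : String) (hfs : ∀ s ∈ fs, 10 ≤ s.toList.length)
    (hc : 5 ≤ c.toList.length) :
    fs.foldl (fun curr pdf_file =>
      if (PySem.List.pyGet? pdf_file.toList 9).getD ' ' > (PySem.List.pyGet? curr.toList 9).getD ' ' then pdf_file
      else if (PySem.List.pyGet? pdf_file.toList 9).getD ' ' = (PySem.List.pyGet? curr.toList 9).getD ' ' ∧
              PySem.List.slice pdf_file.toList (some 3) (some 5) > PySem.List.slice curr.toList (some 3) (some 5) then pdf_file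
      else if (PySem.List.pyGet? pdf_file.toList 9).getD ' ' = (PySem.List.pyGet? curr.toList 9).getD ' ' ∧
              PySem.List.slice pdf_file.toList (some 3) (some 5) = PySem.List.slice curr.toList (some 3) (some 5) ∧
              PySem.List.slice pdf_file.toList (some 0) (some 2) > PySem.List.slice curr.toList (some 0) (some 2) then pdf_file
      else curr) c
    = fs.foldl (fun cu x => if pvKey cu < pvKey x then x else cu) c := by
  induction fs generalizing c with
  | nil => rfl
  | cons x fs ih =>
    have hx : 10 ≤ x.toList.length := hfs x (by simp)
    simp only [List.foldl_cons]
    rw [pvStep_eq c x hc (by omega)]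
    by_cases h : pvKey c < pvKey x
    · rw [if_pos h]
      exact ih x (fun s hs => hfs s (by simp [hs])) (by omega)
    · rw [if_neg h]
      exact ih c (fun s hs => hfs s (by simp [hs])) hc

-- ===== VERDICT (by name: the statement is the Claim_ definition above) =====
theorem getlatestpdf_spec : Claim_equal_getlatestpdf := by
  intro pdf_files _ hpre
  unfold Spec_getlatestpdf getlatestpdf getlatestpdf_alt
  rw [PySem.List.sorted_rev_eq_foldl_insertBy, List.foldl_cons]
  have hseed : PySem.List.insertBy (fun a b => decide (pvKey b < pvKey a)) "00.00.0000.pdf" ([] : List String)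
      = ["00.00.0000.pdf"] := by simp [PySem.List.insertBy]
  rw [hseed, pvHead_foldl_insertBy, pvScan_eq pdf_files "00.00.0000.pdf" hpre (by decide)]
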